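-- pv_equiv track=rewrite | github.com/HarshPandita/prac25 | me2/court.py | assign_courts
-- ===== SOURCE A (Python) =====
-- import heapq
--
-- def assign_courts(intervals):
--     # Sort intervals by start time
--     intervals.sort(key=lambda x: x[0]) #o(nlog(n))
--
--     # List of (end_time, court_id)
--     court_heap = []
--     court_assignments = {}
--     court_id_counter = 1
--
--     for interval in intervals:
--         start, end = interval
--         # assigned = False
--
--         # Try to reuse a court (check earliest end time)
--         if court_heap and court_heap[0][0] <= start:
--             earliest_end, court_id = heapq.heappop(court_heap)
--             court_assignments[court_id].append(interval)
--             heapq.heappush(court_heap, (end, court_id))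
--             # assigned = True
--         else:
--             # Allocate new court
--             court_id = court_id_counter
--             court_id_counter += 1
--             court_assignments[court_id] = [interval]
--             heapq.heappush(court_heap, (end, court_id))
--
--     return court_assignments
-- ===== SOURCE B (Python) =====
-- def assign_courts(intervals):
--     # Same in-place sort by start time as the original (mutates the argument).
--     intervals.sort(key=lambda x: x[0])
--
--     ends = []         # ends[i] = current end time of court i+1
--     assignments = []  # assignments[i] = intervals assigned to court i+1
--     for iv in intervals:
--         start, end = iv
--         # linear scan for the free court with the smallest (end, id)
--         best = -1
--         beste = 0
--         for i, e in enumerate(ends):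
--             if e <= start and (best < 0 or e < beste):
--                 best, beste = i, e
--         if best >= 0:
--             ends[best] = end
--             assignments[best].append(iv)
--         else:
--             ends.append(end)
--             assignments.append([iv])
--     return {i + 1: a for i, a in enumerate(assignments)}
-- ===== Notes on version B (the rewrite author's own statement) =====
-- stated objective: simpler
-- what changed: Replaces the binary heap of (end_time, court_id) tuples (heapq push/pop with sift operations) by a plain per-court list of current end times that is scanned linearly for the free court with the minimal (end, id); court ids become list positions, so the result dict is just an enumeration of the per-court assignment lists.
import Mathlib
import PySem

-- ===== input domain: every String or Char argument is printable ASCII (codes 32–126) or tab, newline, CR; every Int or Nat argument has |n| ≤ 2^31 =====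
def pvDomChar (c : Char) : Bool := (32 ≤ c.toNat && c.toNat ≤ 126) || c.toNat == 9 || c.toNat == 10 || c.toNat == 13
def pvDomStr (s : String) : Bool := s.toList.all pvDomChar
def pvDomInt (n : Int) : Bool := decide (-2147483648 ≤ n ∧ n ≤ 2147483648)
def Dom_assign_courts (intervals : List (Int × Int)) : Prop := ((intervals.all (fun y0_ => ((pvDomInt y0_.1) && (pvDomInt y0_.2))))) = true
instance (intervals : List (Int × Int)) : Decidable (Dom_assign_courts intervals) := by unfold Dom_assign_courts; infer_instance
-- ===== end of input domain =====

-- B replaces A's binary heap of (end, court_id) by a per-court list of current end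
-- times scanned linearly for the minimal free court (objective: simpler — no heap
-- machinery).  Both versions sort the input in place (Python side); the theorems
-- below are about the RETURN value.

-- ===== PORT A =====
-- Python tuple '<' on (end, court_id) pairs
def pyLt (a b : Int × Int) : Bool := a.1 < b.1 || (a.1 == b.1 && a.2 < b.2)

-- heap[i] (indices produced by heapq are always in range; default is never read)
def hget (h : List (Int × Int)) (i : Nat) : Int × Int := h.getD i (0, 0)

-- the while-loop of heapq._siftdown (bubble the hole at pos up towards startpos)
def siftdownLoop (newitem : Int × Int) (startpos : Nat) (pos : Nat) (h : List (Int × Int)) :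
    Nat × List (Int × Int) :=
  if _hp : startpos < pos then
    let parentpos := (pos - 1) / 2
    let parent := hget h parentpos
    if pyLt newitem parent then
      siftdownLoop newitem startpos parentpos (h.set pos parent)
    else (pos, h)
  else (pos, h)
termination_by pos
decreasing_by omega

-- heapq._siftdown
def siftdown (h : List (Int × Int)) (startpos pos : Nat) : List (Int × Int) :=
  let newitem := hget h pos
  let r := siftdownLoop newitem startpos pos h
  r.2.set r.1 newitem

-- heapq.heappush
def heappush (h : List (Int × Int)) (item : Int × Int) : List (Int × Int) :=
  siftdown (h ++ [item]) 0 h.length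

-- the while-loop of heapq._siftup (move the smaller child up until a leaf)
def siftupLoop (endpos : Nat) (pos : Nat) (h : List (Int × Int)) : Nat × List (Int × Int) :=
  if _hc : 2 * pos + 1 < endpos then
    let childpos :=
      if 2 * pos + 2 < endpos && !(pyLt (hget h (2 * pos + 1)) (hget h (2 * pos + 2))) then
        2 * pos + 2
      else 2 * pos + 1
    siftupLoop endpos childpos (h.set pos (hget h childpos))
  else (pos, h)
termination_by endpos - pos
decreasing_by split <;> omega

-- heapq._siftup
def siftup (h : List (Int × Int)) (pos : Nat) : List (Int × Int) :=
  let endpos := h.length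
  let startpos := pos
  let newitem := hget h pos
  let r := siftupLoop endpos pos h
  siftdown (r.2.set r.1 newitem) startpos r.1

-- heapq.heappop (A only calls it on a non-empty heap)
def heappop (h : List (Int × Int)) : (Int × Int) × List (Int × Int) :=
  let lastelt := hget h (h.length - 1)
  let rest := h.dropLast
  if rest.isEmpty then (lastelt, rest)
  else
    let returnitem := hget rest 0
    (returnitem, siftup (rest.set 0 lastelt) 0)

-- the body of A's for-loop; state = (court_heap, court_assignments, court_id_counter)
def stepA (st : List (Int × Int) × PySem.Dict Int (List (Int × Int)) × Int)
    (iv : Int × Int) : List (Int × Int) × PySem.Dict Int (List (Int × Int)) × Int :=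
  if !st.1.isEmpty && decide ((hget st.1 0).1 ≤ iv.1) then
    let p := heappop st.1
    let court_id := p.1.2
    (heappush p.2 (iv.2, court_id), st.2.1.modify court_id [] (· ++ [iv]), st.2.2)
  else
    let court_id := st.2.2
    (heappush st.1 (iv.2, court_id), st.2.1.insert court_id [iv], st.2.2 + 1)

def assign_courts (intervals : List (Int × Int)) : List (Int × List (Int × Int)) :=
  let sortedIv := PySem.List.sorted intervals (fun x => x.1)
  let st := sortedIv.foldl stepA ([], PySem.Dict.empty, 1)
  st.2.1.items

-- ===== PORT B =====
-- the inner scan of B: first index holding the minimal end ≤ start, else -1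
def pickCourt (start : Int) (ends : List Int) : Int × Int :=
  (PySem.List.enumerate ends).foldl
    (fun b p => if p.2 ≤ start ∧ (b.1 < 0 ∨ p.2 < b.2) then (p.1, p.2) else b) (-1, 0)

-- the body of B's for-loop; state = (ends, assignments)
def stepB (st : List Int × List (List (Int × Int))) (iv : Int × Int) :
    List Int × List (List (Int × Int)) :=
  let b := pickCourt iv.1 st.1
  if 0 ≤ b.1 then
    (st.1.set b.1.toNat iv.2, st.2.set b.1.toNat (st.2.getD b.1.toNat [] ++ [iv]))
  else
    (st.1 ++ [iv.2], st.2 ++ [[iv]])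

def assign_courts_alt (intervals : List (Int × Int)) : List (Int × List (Int × Int)) :=
  let sortedIv := PySem.List.sorted intervals (fun x => x.1)
  let st := sortedIv.foldl stepB ([], [])
  (PySem.List.enumerate st.2).map (fun p => (p.1 + 1, p.2))

-- ===== PRECONDITION & SPEC =====
def Spec_assign_courts (intervals : List (Int × Int)) (out : List (Int × List (Int × Int))) : Prop := out = assign_courts_alt intervals
instance (intervals : List (Int × Int)) (out : List (Int × List (Int × Int))) : Decidable (Spec_assign_courts intervals out) := by unfold Spec_assign_courts; infer_instance

-- ===== CLAIM (what is proved, stated in full; the proofs are below) =====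
def Claim_equal_assign_courts : Prop := ∀ (intervals : List (Int × Int)), Dom_assign_courts intervals → Spec_assign_courts intervals (assign_courts intervals)

-- ===== LEMMAS AND PROOFS =====

theorem pyLt_irrefl (a : Int × Int) : pyLt a a = false := by simp [pyLt]

theorem pyLt_asymm {a b : Int × Int} (h : pyLt a b = true) : pyLt b a = false := by
  obtain ⟨a1, a2⟩ := a; obtain ⟨b1, b2⟩ := b
  simp [pyLt] at h ⊢; omega

theorem pyLe_trans {a b c : Int × Int} (h1 : pyLt b a = false) (h2 : pyLt c b = false) :
    pyLt c a = false := by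
  obtain ⟨a1, a2⟩ := a; obtain ⟨b1, b2⟩ := b; obtain ⟨c1, c2⟩ := c
  simp [pyLt] at h1 h2 ⊢; omega

theorem hget_eq_getElem {h : List (Int × Int)} {i : Nat} (hi : i < h.length) :
    hget h i = h[i] := by
  simp [hget, List.getD_eq_getElem?_getD, List.getElem?_eq_getElem hi]

theorem hget_set_self {h : List (Int × Int)} {i : Nat} (x : Int × Int) (hi : i < h.length) :
    hget (h.set i x) i = x := by
  simp [hget, List.getD_eq_getElem?_getD, hi]

theorem hget_set_ne {h : List (Int × Int)} {i j : Nat} (x : Int × Int) (hij : i ≠ j) :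
    hget (h.set i x) j = hget h j := by
  simp [hget, List.getD_eq_getElem?_getD, List.getElem?_set_ne hij]

theorem hget_append_left {h t : List (Int × Int)} {i : Nat} (hi : i < h.length) :
    hget (h ++ t) i = hget h i := by
  simp [hget, List.getD_eq_getElem?_getD, List.getElem?_append_left hi]

theorem count_set_add (l : List (Int × Int)) (i : Nat) (x y : Int × Int) (hi : i < l.length) :
    (l.set i x).count y + (if hget l i = y then 1 else 0)
      = l.count y + (if x = y then 1 else 0) := by
  induction l generalizing i with
  | nil => simp at hi
  | cons a t ih =>
    cases i with
    | zero => simp [hget, List.count_cons]; split_ifs <;> simp_all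
    | succ n =>
      have := ih n (by simpa using hi)
      simp [List.count_cons, hget] at this ⊢
      split_ifs at this ⊢ <;> simp_all

theorem set_self_eq (l : List (Int × Int)) (i : Nat) (hi : i < l.length) :
    l.set i (hget l i) = l := by
  rw [hget_eq_getElem hi]; exact List.set_getElem_self ..

theorem pyLe_of_lt_of_le {a b x : Int × Int} (h1 : pyLt a b = true) (h2 : pyLt x b = false) :
    pyLt x a = false := by
  obtain ⟨a1, a2⟩ := a; obtain ⟨b1, b2⟩ := b; obtain ⟨x1, x2⟩ := x
  simp [pyLt] at h1 h2 ⊢; omega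

def HeapInv (h : List (Int × Int)) : Prop :=
  ∀ c, c < h.length → 0 < c → pyLt (hget h c) (hget h ((c - 1) / 2)) = false

def SDInv (newitem : Int × Int) (pos : Nat) (h : List (Int × Int)) : Prop :=
  pos < h.length ∧
  (∀ c, c < h.length → 0 < c → c ≠ pos → pyLt (hget h c) (hget h ((c - 1) / 2)) = false) ∧
  (∀ c, c < h.length → 0 < c → (c - 1) / 2 = pos → pyLt (hget h c) newitem = false) ∧
  (0 < pos → ∀ c, c < h.length → 0 < c → (c - 1) / 2 = pos →
    pyLt (hget h c) (hget h ((pos - 1) / 2)) = false)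

theorem siftdownLoop_spec (newitem : Int × Int) :
    ∀ pos h p h', SDInv newitem pos h → siftdownLoop newitem 0 pos h = (p, h') →
      HeapInv (h'.set p newitem) ∧
      (∀ y, (h'.set p newitem).count y = (h.set pos newitem).count y) := by
  intro pos
  induction pos using Nat.strong_induction_on with
  | _ pos ih =>
    intro h p h' hsd heq
    obtain ⟨hlen, hA, hB, hC⟩ := hsd
    rw [siftdownLoop] at heq
    by_cases hp : 0 < pos
    · rw [dif_pos hp] at heq
      set pp := (pos - 1) / 2 with hpp
      have hpplt : pp < pos := by omega
      have hpplen : pp < h.length := by omega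
      have hppne : pp ≠ pos := by omega
      by_cases hlt : pyLt newitem (hget h pp) = true
      · rw [if_pos hlt] at heq
        have hsd' : SDInv newitem pp (h.set pos (hget h pp)) := by
          refine ⟨by simpa using hpplen, ?_, ?_, ?_⟩
          · -- (A)
            intro c hc hc0 hcne
            rw [List.length_set] at hc
            by_cases hcpos : c = pos
            · subst hcpos
              rw [hget_set_self _ hlen, hget_set_ne _ (by omega)]
              have : (c - 1) / 2 = pp := by omega
              rw [this]
              exact pyLt_irrefl _
            · rw [hget_set_ne _ (by omega)]
              by_cases hpar : (c - 1) / 2 = pos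
              · rw [hpar, hget_set_self _ hlen]
                exact hC hp c hc hc0 hpar
              · rw [hget_set_ne _ (by omega)]
                exact hA c hc hc0 hcpos
          · -- (B)
            intro c hc hc0 hpar
            rw [List.length_set] at hc
            by_cases hcpos : c = pos
            · subst hcpos
              rw [hget_set_self _ hlen]
              exact pyLt_asymm hlt
            · rw [hget_set_ne _ (by omega)]
              have hane : (c - 1) / 2 ≠ pos := by omega
              have := hA c hc hc0 (by omega)
              rw [hpar] at this
              exact pyLe_of_lt_of_le hlt this
          · -- (C)
            intro hpp0 c hc hc0 hpar
            rw [List.length_set] at hc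
            have hgpne : pos ≠ (pp - 1) / 2 := by omega
            by_cases hcpos : c = pos
            · subst hcpos
              rw [hget_set_self _ hlen, hget_set_ne _ hgpne]
              exact hA pp hpplen hpp0 hppne
            · rw [hget_set_ne _ (by omega), hget_set_ne _ hgpne]
              have h1 := hA c (by omega) hc0 hcpos
              rw [hpar] at h1
              have h2 := hA pp hpplen hpp0 hppne
              exact pyLe_trans h2 h1
        obtain ⟨hinv, hcount⟩ := ih pp hpplt (h.set pos (hget h pp)) p h' hsd' heq
        refine ⟨hinv, ?_⟩
        intro y
        have e1 := hcount y
        have e2 := count_set_add (h.set pos (hget h pp)) pp newitem y (by simpa using hpplen)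
        rw [hget_set_ne _ (by omega)] at e2
        have e3 := count_set_add h pos (hget h pp) y hlen
        have e4 := count_set_add h pos newitem y hlen
        by_cases b1 : hget h pp = y <;> by_cases b2 : hget h pos = y <;>
          by_cases b3 : newitem = y <;>
          simp [b1, b2, b3] at e1 e2 e3 e4 ⊢ <;> omega
      · rw [if_neg hlt] at heq
        obtain ⟨rfl, rfl⟩ : pos = p ∧ h = h' := by
          simpa [Prod.ext_iff] using heq
        refine ⟨?_, fun y => rfl⟩
        intro c hc hc0
        rw [List.length_set] at hc
        by_cases hcpos : c = pos
        · subst hcpos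
          rw [hget_set_self _ hlen, hget_set_ne _ (by omega)]
          simpa using hlt
        · rw [hget_set_ne _ (by omega)]
          by_cases hpar : (c - 1) / 2 = pos
          · rw [hpar, hget_set_self _ hlen]
            exact hB c hc hc0 hpar
          · rw [hget_set_ne _ (by omega)]
            exact hA c hc hc0 hcpos
    · rw [dif_neg hp] at heq
      obtain ⟨rfl, rfl⟩ : pos = p ∧ h = h' := by
        simpa [Prod.ext_iff] using heq
      have hpos0 : pos = 0 := by omega
      subst hpos0
      refine ⟨?_, fun y => rfl⟩
      intro c hc hc0
      rw [List.length_set] at hc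
      rw [hget_set_ne _ (by omega)]
      by_cases hpar : (c - 1) / 2 = 0
      · rw [hpar, hget_set_self _ hlen]
        exact hB c hc hc0 hpar
      · rw [hget_set_ne _ (by omega)]
        exact hA c hc hc0 (by omega)

theorem heappush_spec (h : List (Int × Int)) (x : Int × Int) (hinv : HeapInv h) :
    HeapInv (heappush h x) ∧
      ∀ y, (heappush h x).count y = h.count y + (if x = y then 1 else 0) := by
  have hlen : h.length < (h ++ [x]).length := by simp
  have hsd : SDInv (hget (h ++ [x]) h.length) h.length (h ++ [x]) := by
    refine ⟨hlen, ?_, ?_, ?_⟩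
    · intro c hc hc0 hcne
      simp only [List.length_append, List.length_cons, List.length_nil] at hc
      have hclt : c < h.length := by omega
      rw [hget_append_left hclt, hget_append_left (by omega)]
      exact hinv c hclt hc0
    · intro c hc hc0 hpar
      simp only [List.length_append, List.length_cons, List.length_nil] at hc
      omega
    · intro _ c hc hc0 hpar
      simp only [List.length_append, List.length_cons, List.length_nil] at hc
      omega
  obtain ⟨p, h', heq⟩ : ∃ p h', siftdownLoop (hget (h ++ [x]) h.length) 0 h.length (h ++ [x]) = (p, h') :=
    ⟨_, _, rfl⟩
  obtain ⟨hinv', hcnt⟩ := siftdownLoop_spec _ _ _ _ _ hsd heq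
  have hres : heappush h x = h'.set p (hget (h ++ [x]) h.length) := by
    simp only [heappush, siftdown]
    rw [heq]
  rw [hres]
  refine ⟨hinv', ?_⟩
  intro y
  rw [hcnt y, set_self_eq _ _ hlen, List.count_append]
  by_cases hxy : x = y <;> simp [hxy]

theorem root_min (h : List (Int × Int)) (hinv : HeapInv h) :
    ∀ i, i < h.length → pyLt (hget h i) (hget h 0) = false := by
  intro i
  induction i using Nat.strong_induction_on with
  | _ i ih =>
    intro hi
    by_cases hi0 : 0 < i
    · have h1 := hinv i hi hi0
      have h2 := ih ((i - 1) / 2) (by omega) (by omega)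
      exact pyLe_trans h2 h1
    · have : i = 0 := by omega
      subst this
      exact pyLt_irrefl _

def SUInv (pos : Nat) (h : List (Int × Int)) : Prop :=
  pos < h.length ∧
  (∀ c, c < h.length → 0 < c → (c - 1) / 2 ≠ pos →
    pyLt (hget h c) (hget h ((c - 1) / 2)) = false) ∧
  (0 < pos → ∀ c, c < h.length → 0 < c → (c - 1) / 2 = pos →
    pyLt (hget h c) (hget h ((pos - 1) / 2)) = false)

theorem siftupLoop_spec (endpos : Nat) :
    ∀ n pos h p h', endpos - pos ≤ n → h.length = endpos → SUInv pos h →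
      siftupLoop endpos pos h = (p, h') →
      h'.length = endpos ∧ p < endpos ∧ endpos ≤ 2 * p + 1 ∧
      (∀ c, c < endpos → 0 < c → c ≠ p →
        pyLt (hget h' c) (hget h' ((c - 1) / 2)) = false) ∧
      (∀ x y, (h'.set p x).count y = (h.set pos x).count y) := by
  intro n
  induction n with
  | zero =>
    intro pos h p h' hn hlen hsu heq
    obtain ⟨hpos, hA, hB⟩ := hsu
    rw [siftupLoop, dif_neg (by omega)] at heq
    obtain ⟨rfl, rfl⟩ : pos = p ∧ h = h' := by simpa [Prod.ext_iff] using heq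
    exact ⟨hlen, by omega, by omega, fun c hclt hc0 hcne => hA c (by omega) hc0 (by omega),
      fun x y => rfl⟩
  | succ n ih =>
    intro pos h p h' hn hlen hsu heq
    obtain ⟨hpos, hA, hB⟩ := hsu
    rw [siftupLoop] at heq
    by_cases hc : 2 * pos + 1 < endpos
    · rw [dif_pos hc] at heq
      set cp := if (2 * pos + 2 < endpos && !pyLt (hget h (2 * pos + 1)) (hget h (2 * pos + 2))) = true
        then 2 * pos + 2 else 2 * pos + 1 with hcp
      have hcases : (cp = 2 * pos + 1 ∧ (2 * pos + 2 < endpos →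
            pyLt (hget h (2 * pos + 1)) (hget h (2 * pos + 2)) = true)) ∨
          (cp = 2 * pos + 2 ∧ 2 * pos + 2 < endpos ∧
            pyLt (hget h (2 * pos + 1)) (hget h (2 * pos + 2)) = false) := by
        rw [hcp]; split
        · next hb => simp only [Bool.and_eq_true, decide_eq_true_eq, Bool.not_eq_true'] at hb
                     right; exact ⟨rfl, hb.1, hb.2⟩
        · next hb => simp only [Bool.and_eq_true, decide_eq_true_eq, Bool.not_eq_true',
                       not_and, Bool.not_eq_false] at hb
                     left; exact ⟨rfl, hb⟩
      have hcplt : cp < endpos := by rcases hcases with ⟨h1, _⟩ | ⟨h1, h2, _⟩ <;> omega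
      have hcpgt : pos < cp := by rcases hcases with ⟨h1, _⟩ | ⟨h1, _⟩ <;> omega
      have hcppar : (cp - 1) / 2 = pos := by rcases hcases with ⟨h1, _⟩ | ⟨h1, _⟩ <;> omega
      have hminc : ∀ c, c < endpos → 0 < c → (c - 1) / 2 = pos →
          pyLt (hget h c) (hget h cp) = false := by
        intro c hclt hc0 hpar
        have hc12 : c = 2 * pos + 1 ∨ c = 2 * pos + 2 := by omega
        rcases hcases with ⟨he, himp⟩ | ⟨he, _, hlr⟩ <;> rcases hc12 with rfl | rfl <;> rw [he]
        · exact pyLt_irrefl _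
        · exact pyLt_asymm (himp (by omega))
        · exact hlr
        · exact pyLt_irrefl _
      have hlen' : (h.set pos (hget h cp)).length = endpos := by simpa using hlen
      have hsu' : SUInv cp (h.set pos (hget h cp)) := by
        refine ⟨by omega, ?_, ?_⟩
        · intro c hclt hc0 hcne
          rw [List.length_set] at hclt
          by_cases hcpos : c = pos
          · subst hcpos
            have hppne : (c - 1) / 2 ≠ c := by omega
            rw [hget_set_self _ (by omega), hget_set_ne _ (by omega)]
            have hc0' : 0 < c := hc0
            exact hB hc0 cp (by omega) (by omega) hcppar
          · rw [hget_set_ne _ (by omega)]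
            by_cases hpar : (c - 1) / 2 = pos
            · rw [hpar, hget_set_self _ (by omega)]
              by_cases hccp : c = cp
              · subst hccp; exact pyLt_irrefl _
              · exact hminc c (by omega) hc0 hpar
            · rw [hget_set_ne _ (by omega)]
              exact hA c (by omega) hc0 hpar
        · intro hcp0 c hclt hc0 hpar
          rw [List.length_set] at hclt
          rw [hcppar, hget_set_ne _ (by omega), hget_set_self _ (by omega)]
          have := hA c (by omega) hc0 (by omega)
          rwa [hpar] at this
      obtain ⟨l1, l2, l3, l4, l5⟩ := ih cp (h.set pos (hget h cp)) p h' (by omega) hlen' hsu' heq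
      refine ⟨l1, l2, l3, l4, ?_⟩
      intro x y
      have e1 := l5 x y
      have e2 := count_set_add (h.set pos (hget h cp)) cp x y (by omega)
      rw [hget_set_ne _ (by omega)] at e2
      have e3 := count_set_add h pos (hget h cp) y (by omega)
      have e4 := count_set_add h pos x y (by omega)
      rw [e1]
      by_cases b1 : hget h cp = y <;> by_cases b2 : hget h pos = y <;> by_cases b3 : x = y <;>
        simp [b1, b2, b3] at e2 e3 e4 ⊢ <;> omega
    · rw [dif_neg hc] at heq
      obtain ⟨rfl, rfl⟩ : pos = p ∧ h = h' := by simpa [Prod.ext_iff] using heq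
      exact ⟨hlen, by omega, by omega, fun c hclt hc0 hcne => hA c (by omega) hc0 (by omega),
        fun x y => rfl⟩

theorem siftup0_spec (h : List (Int × Int)) (h0 : 0 < h.length)
    (hA : ∀ c, c < h.length → 0 < c → (c - 1) / 2 ≠ 0 →
      pyLt (hget h c) (hget h ((c - 1) / 2)) = false) :
    HeapInv (siftup h 0) ∧ ∀ y, (siftup h 0).count y = h.count y := by
  obtain ⟨p, h', heq⟩ : ∃ p h', siftupLoop h.length 0 h = (p, h') := ⟨_, _, rfl⟩
  obtain ⟨l1, l2, l3, l4, l5⟩ := siftupLoop_spec h.length h.length 0 h p h' (by omega) rfl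
    ⟨h0, hA, by omega⟩ heq
  have hres : siftup h 0 = siftdown (h'.set p (hget h 0)) 0 p := by
    simp only [siftup]; rw [heq]
  have hplen : p < (h'.set p (hget h 0)).length := by simp [l1, l2]
  have hgetp : hget (h'.set p (hget h 0)) p = hget h 0 := hget_set_self _ (by omega)
  obtain ⟨p2, h2, heq2⟩ : ∃ p2 h2,
      siftdownLoop (hget (h'.set p (hget h 0)) p) 0 p (h'.set p (hget h 0)) = (p2, h2) :=
    ⟨_, _, rfl⟩
  have hsd : SDInv (hget (h'.set p (hget h 0)) p) p (h'.set p (hget h 0)) := by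
    refine ⟨hplen, ?_, ?_, ?_⟩
    · intro c hc hc0 hcne
      rw [List.length_set, l1] at hc
      have hparne : (c - 1) / 2 ≠ p := by omega
      rw [hget_set_ne _ (by omega), hget_set_ne _ (by omega)]
      exact l4 c hc hc0 hcne
    · intro c hc hc0 hpar
      rw [List.length_set, l1] at hc
      omega
    · intro _ c hc hc0 hpar
      rw [List.length_set, l1] at hc
      omega
  obtain ⟨hinv, hcnt⟩ := siftdownLoop_spec _ _ _ _ _ hsd heq2
  have hres2 : siftup h 0 = h2.set p2 (hget (h'.set p (hget h 0)) p) := by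
    rw [hres]; simp only [siftdown]; rw [heq2]
  rw [hres2]
  refine ⟨hinv, ?_⟩
  intro y
  rw [hcnt y, hgetp, List.set_set]
  rw [l5 (hget h 0) y, set_self_eq _ _ h0]

theorem hget_dropLast (h : List (Int × Int)) (i : Nat) (hi : i < h.length - 1) :
    hget h.dropLast i = hget h i := by
  rw [hget_eq_getElem (by simpa using hi), hget_eq_getElem (by omega)]
  exact List.getElem_dropLast ..

theorem heappop_spec (h : List (Int × Int)) (hinv : HeapInv h) (hne : h ≠ []) :
    (heappop h).1 = hget h 0 ∧ HeapInv (heappop h).2 ∧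
      ∀ y, (heappop h).2.count y + (if hget h 0 = y then 1 else 0) = h.count y := by
  have hlen : 0 < h.length := List.length_pos_iff.mpr hne
  have hsplit : h.dropLast ++ [hget h (h.length - 1)] = h := by
    rw [hget_eq_getElem (by omega), ← List.getLast_eq_getElem hne]
    exact List.dropLast_concat_getLast hne
  by_cases hrest : h.dropLast.isEmpty
  · have hlen1 : h.length = 1 := by
      have := List.isEmpty_iff.mp hrest
      have : h.dropLast.length = 0 := by rw [this]; rfl
      simp at this; omega
    have hres : heappop h = (hget h (h.length - 1), h.dropLast) := by
      simp only [heappop]; rw [if_pos hrest]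
    rw [hres]
    have h00 : hget h (h.length - 1) = hget h 0 := by rw [hlen1]
    refine ⟨h00, ?_, ?_⟩
    · intro c hc hc0
      rw [List.isEmpty_iff.mp hrest] at hc
      simp at hc
    · intro y
      rw [List.isEmpty_iff.mp hrest]
      conv_rhs => rw [← hsplit]
      rw [h00, List.count_append]
      by_cases hb : hget h 0 = y <;> simp [hb, List.isEmpty_iff.mp hrest]
  · have hlen2 : 2 ≤ h.length := by
      rcases h with _ | ⟨a, _ | ⟨b, t⟩⟩ <;> simp_all
    have hres : heappop h = (hget h.dropLast 0,
        siftup ((h.dropLast).set 0 (hget h (h.length - 1))) 0) := by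
      simp only [heappop]; rw [if_neg hrest]
    have hr0 : hget h.dropLast 0 = hget h 0 := hget_dropLast h 0 (by omega)
    have hdl : h.dropLast.length = h.length - 1 := by simp
    set H := (h.dropLast).set 0 (hget h (h.length - 1)) with hH
    have hHlen : 0 < H.length := by rw [hH]; simp; omega
    have hHA : ∀ c, c < H.length → 0 < c → (c - 1) / 2 ≠ 0 →
        pyLt (hget H c) (hget H ((c - 1) / 2)) = false := by
      intro c hc hc0 hpar
      rw [hH, List.length_set] at hc
      rw [hH, hget_set_ne _ (by omega), hget_set_ne _ (by omega),
        hget_dropLast h c (by omega), hget_dropLast h _ (by omega)]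
      exact hinv c (by omega) hc0
    obtain ⟨hinv', hcnt⟩ := siftup0_spec H hHlen hHA
    rw [hres]
    refine ⟨hr0, hinv', ?_⟩
    intro y
    rw [hcnt y]
    have e1 := count_set_add h.dropLast 0 (hget h (h.length - 1)) y (by omega)
    rw [hget_dropLast h 0 (by omega)] at e1
    have e2 : h.count y = h.dropLast.count y + (if hget h (h.length - 1) = y then 1 else 0) := by
      conv_lhs => rw [← hsplit]
      rw [List.count_append]
      by_cases hb : hget h (h.length - 1) = y <;> simp [hb]
    rw [← hH] at e1
    by_cases b1 : hget h 0 = y <;> by_cases b2 : hget h (h.length - 1) = y <;>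
      simp [b1, b2] at e1 e2 ⊢ <;> omega

def modelHeap (ends : List Int) : List (Int × Int) :=
  (List.range ends.length).map (fun (i : Nat) => (ends.getD i 0, (i : Int) + 1))

def dmodel (assigns : List (List (Int × Int))) : List (Int × List (Int × Int)) :=
  (List.range assigns.length).map (fun (i : Nat) => (((i : Int) + 1), assigns.getD i []))

theorem length_modelHeap (ends : List Int) : (modelHeap ends).length = ends.length := by
  simp [modelHeap]

theorem hget_modelHeap (ends : List Int) (j : Nat) (hj : j < ends.length) :
    hget (modelHeap ends) j = (ends.getD j 0, (j : Int) + 1) := by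
  rw [hget_eq_getElem (by simpa [length_modelHeap] using hj)]
  simp [modelHeap]

theorem mem_modelHeap {ends : List Int} {x : Int × Int} :
    x ∈ modelHeap ends ↔ ∃ j, j < ends.length ∧ x = (ends.getD j 0, (j : Int) + 1) := by
  simp only [modelHeap, List.mem_map, List.mem_range]
  constructor
  · rintro ⟨j, hj, rfl⟩; exact ⟨j, hj, rfl⟩
  · rintro ⟨j, hj, rfl⟩; exact ⟨j, hj, rfl⟩

theorem modelHeap_set (ends : List Int) (j : Nat) (e : Int) (hj : j < ends.length) :
    modelHeap (ends.set j e) = (modelHeap ends).set j (e, (j : Int) + 1) := by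
  apply List.ext_getElem
  · simp [modelHeap]
  · intro i hi hi'
    simp only [modelHeap, List.length_set] at *
    rw [List.getElem_set]
    simp only [List.getElem_map, List.getElem_range]
    by_cases hij : j = i
    · subst hij
      simp [hj]
    · simp [hij]

theorem modelHeap_concat (ends : List Int) (e : Int) :
    modelHeap (ends ++ [e]) = modelHeap ends ++ [(e, (ends.length : Int) + 1)] := by
  simp only [modelHeap, List.length_append, List.length_cons, List.length_nil]
  rw [List.range_succ, List.map_append]
  congr 1
  · apply List.map_congr_left
    intro i hi
    rw [List.mem_range] at hi
    simp [List.getD_eq_getElem?_getD, List.getElem?_append_left hi]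
  · simp [List.getD_eq_getElem?_getD]

theorem dmodel_concat (assigns : List (List (Int × Int))) (L : List (Int × Int)) :
    dmodel (assigns ++ [L]) = dmodel assigns ++ [((assigns.length : Int) + 1, L)] := by
  simp only [dmodel, List.length_append, List.length_cons, List.length_nil]
  rw [List.range_succ, List.map_append]
  congr 1
  · apply List.map_congr_left
    intro i hi
    rw [List.mem_range] at hi
    simp [List.getD_eq_getElem?_getD, List.getElem?_append_left hi]
  · simp [List.getD_eq_getElem?_getD]

theorem dmodel_set (assigns : List (List (Int × Int))) (j : Nat) (v : List (Int × Int))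
    (hj : j < assigns.length) :
    (dmodel assigns).map (fun p => if p.1 == ((j : Int) + 1) then (((j : Int) + 1), v) else p)
      = dmodel (assigns.set j v) := by
  simp only [dmodel, List.map_map, List.length_set]
  apply List.map_congr_left
  intro i hi
  rw [List.mem_range] at hi
  simp only [Function.comp_apply]
  by_cases hij : i = j
  · subst hij
    simp [List.getD_eq_getElem?_getD, hj]
  · have : ¬((i : Int) + 1 == (j : Int) + 1) = true := by
      simp only [beq_iff_eq]; omega
    rw [if_neg this]
    have : (assigns.set j v).getD i [] = assigns.getD i [] := by
      simp [List.getD_eq_getElem?_getD, List.getElem?_set_ne (by omega : j ≠ i)]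
    rw [this]

theorem dmodel_find (assigns : List (List (Int × Int))) (j : Nat) (hj : j < assigns.length) :
    List.find? (fun p => p.1 == ((j : Int) + 1)) (dmodel assigns)
      = some (((j : Int) + 1), assigns.getD j []) := by
  induction assigns using List.reverseRecOn with
  | nil => simp at hj
  | append_singleton as L ih =>
    rw [dmodel_concat, List.find?_append]
    simp only [List.length_append, List.length_cons, List.length_nil] at hj
    by_cases hjl : j < as.length
    · rw [ih hjl]
      simp [List.getD_eq_getElem?_getD, List.getElem?_append_left hjl]
    · have hje : j = as.length := by omega
      have hnone : List.find? (fun p => p.1 == ((j : Int) + 1)) (dmodel as) = none := by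
        rw [List.find?_eq_none]
        intro p hp
        simp only [dmodel, List.mem_map, List.mem_range] at hp
        obtain ⟨i, hi, rfl⟩ := hp
        simp only [beq_iff_eq]
        omega
      rw [hnone]
      simp [hje, List.getD_eq_getElem?_getD]

theorem dmodel_not_contains (assigns : List (List (Int × Int))) :
    (dmodel assigns).any (fun p => p.1 == ((assigns.length : Int) + 1)) = false := by
  rw [List.any_eq_false]
  intro p hp
  simp only [dmodel, List.mem_map, List.mem_range] at hp
  obtain ⟨i, hi, rfl⟩ := hp
  simp only [beq_iff_eq]
  omega

theorem dmodel_contains (assigns : List (List (Int × Int))) (j : Nat) (hj : j < assigns.length) :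
    (dmodel assigns).any (fun p => p.1 == ((j : Int) + 1)) = true := by
  rw [List.any_eq_true]
  refine ⟨((j : Int) + 1, assigns.getD j []), ?_, by simp⟩
  exact List.mem_of_find?_eq_some (dmodel_find assigns j hj)

theorem mem_getD {as : List Int} {k : Nat} (hk : k < as.length) : as.getD k 0 ∈ as := by
  rw [List.getD_eq_getElem?_getD, List.getElem?_eq_getElem hk]
  exact List.getElem_mem hk

theorem pickCourt_spec (s : Int) (ends : List Int) :
    (pickCourt s ends = (-1, 0) ∧ ∀ e ∈ ends, ¬ e ≤ s) ∨
    (∃ j : Nat, j < ends.length ∧ pickCourt s ends = ((j : Int), ends.getD j 0) ∧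
      ends.getD j 0 ≤ s ∧
      ∀ k, k < ends.length → ends.getD k 0 ≤ s →
        (ends.getD j 0 < ends.getD k 0 ∨ (ends.getD j 0 = ends.getD k 0 ∧ j ≤ k))) := by
  induction ends using List.reverseRecOn with
  | nil =>
    left
    exact ⟨rfl, by simp⟩
  | append_singleton as x ih =>
    have hgl : ∀ k, k < as.length → (as ++ [x]).getD k 0 = as.getD k 0 := by
      intro k hk
      simp [List.getD_eq_getElem?_getD, List.getElem?_append_left hk]
    have hgr : (as ++ [x]).getD as.length 0 = x := by
      simp [List.getD_eq_getElem?_getD]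
    have hstep : pickCourt s (as ++ [x]) =
        (if x ≤ s ∧ ((pickCourt s as).1 < 0 ∨ x < (pickCourt s as).2)
          then ((as.length : Int), x) else pickCourt s as) := by
      simp only [pickCourt]
      rw [PySem.List.enumerate_append, List.foldl_append,
        PySem.List.enumerate_cons, PySem.List.enumerate_nil]
      simp
    rcases ih with ⟨hpc, hnone⟩ | ⟨j, hj, hpc, hq, hmin⟩
    · rw [hpc] at hstep
      by_cases hx : x ≤ s
      · rw [if_pos (by simp [hx])] at hstep
        right
        refine ⟨as.length, by simp, by rw [hstep, hgr], by rwa [hgr], ?_⟩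
        intro k hk hkq
        simp only [List.length_append, List.length_cons, List.length_nil] at hk
        by_cases hkl : k < as.length
        · exact absurd hkq (by rw [hgl k hkl]; exact hnone _ (mem_getD hkl))
        · have : k = as.length := by omega
          subst this
          exact Or.inr ⟨rfl, le_refl _⟩
      · rw [if_neg (by simp [hx])] at hstep
        left
        refine ⟨hstep, ?_⟩
        intro e he
        rcases List.mem_append.mp he with h1 | h1
        · exact hnone e h1
        · simp at h1; subst h1; exact hx
    · rw [hpc] at hstep
      simp only [] at hstep
      by_cases hx : x ≤ s ∧ x < as.getD j 0
      · rw [if_pos (by exact ⟨hx.1, Or.inr hx.2⟩)] at hstep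
        right
        refine ⟨as.length, by simp, by rw [hstep, hgr], by rw [hgr]; exact hx.1, ?_⟩
        intro k hk hkq
        simp only [List.length_append, List.length_cons, List.length_nil] at hk
        by_cases hkl : k < as.length
        · rw [hgl k hkl] at hkq ⊢
          rw [hgr]
          rcases hmin k hkl hkq with h1 | h1
          · left; omega
          · left; omega
        · have : k = as.length := by omega
          subst this
          rw [hgr]
          exact Or.inr ⟨rfl, le_refl _⟩
      · have hcond : ¬(x ≤ s ∧ ((j : Int) < 0 ∨ x < as.getD j 0)) := by
          rintro ⟨h1, h2 | h2⟩
          · omega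
          · exact hx ⟨h1, h2⟩
        rw [if_neg hcond] at hstep
        right
        refine ⟨j, ?_, ?_, ?_, ?_⟩
        · simp; omega
        · rw [hstep, hgl j hj]
        · rwa [hgl j hj]
        · intro k hk hkq
          simp only [List.length_append, List.length_cons, List.length_nil] at hk
          rw [hgl j hj]
          by_cases hkl : k < as.length
          · rw [hgl k hkl] at hkq ⊢
            exact hmin k hkl hkq
          · have : k = as.length := by omega
            subst this
            rw [hgr] at hkq ⊢
            have : ¬ x < as.getD j 0 := fun hc => hx ⟨hkq, hc⟩
            by_cases he : as.getD j 0 = x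
            · exact Or.inr ⟨he, by omega⟩
            · left; omega

theorem root_min_mem (h : List (Int × Int)) (hinv : HeapInv h) :
    ∀ x ∈ h, pyLt x (hget h 0) = false := by
  intro x hx
  obtain ⟨i, hi, rfl⟩ := List.mem_iff_getElem.mp hx
  rw [← hget_eq_getElem hi]
  exact root_min h hinv i hi

def SimInv (a : List (Int × Int) × PySem.Dict Int (List (Int × Int)) × Int)
    (b : List Int × List (List (Int × Int))) : Prop :=
  HeapInv a.1 ∧ a.1.Perm (modelHeap b.1) ∧
  a.2.1 = PySem.Dict.mk (dmodel b.2) ∧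
  b.2.length = b.1.length ∧ a.2.2 = (b.1.length : Int) + 1

theorem step_inv (a : List (Int × Int) × PySem.Dict Int (List (Int × Int)) × Int)
    (b : List Int × List (List (Int × Int))) (iv : Int × Int) (h : SimInv a b) :
    SimInv (stepA a iv) (stepB b iv) := by
  obtain ⟨heap, dict, counter⟩ := a
  obtain ⟨ends, assigns⟩ := b
  obtain ⟨hinv, hperm, hdict, hlen, hcnt⟩ := h
  simp only [] at hinv hperm hdict hlen hcnt
  have hlenheap : heap.length = ends.length := by
    rw [hperm.length_eq, length_modelHeap]
  have hcount : ∀ y, heap.count y = (modelHeap ends).count y :=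
    List.perm_iff_count.mp hperm
  by_cases hcond : (!heap.isEmpty && decide ((hget heap 0).1 ≤ iv.1)) = true
  · -- A reuses a court
    simp only [Bool.and_eq_true, Bool.not_eq_true', List.isEmpty_eq_false_iff,
      decide_eq_true_eq] at hcond
    obtain ⟨hne, hle⟩ := hcond
    have hne' : 0 < heap.length := List.length_pos_iff.mpr hne
    have hrootmem : hget heap 0 ∈ modelHeap ends := by
      rw [← hperm.mem_iff]
      rw [hget_eq_getElem hne']
      exact List.getElem_mem hne'
    obtain ⟨i, hi, hroot⟩ := mem_modelHeap.mp hrootmem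
    have hmodmin : ∀ k, k < ends.length →
        pyLt (ends.getD k 0, (k : Int) + 1) (hget heap 0) = false := by
      intro k hk
      apply root_min_mem heap hinv
      rw [hperm.mem_iff]
      exact mem_modelHeap.mpr ⟨k, hk, rfl⟩
    -- B picks the same court i
    have hpick : pickCourt iv.1 ends = ((i : Int), ends.getD i 0) := by
      rcases pickCourt_spec iv.1 ends with ⟨hpc, hnone⟩ | ⟨j, hj, hpc, hq, hmin⟩
      · exfalso
        have hmem := hnone _ (mem_getD hi)
        rw [hroot] at hle
        exact hmem (by simpa using hle)
      · have hji : j = i := by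
          have h1 := hmin i hi (by rw [hroot] at hle; exact hle)
          have h2 := hmodmin j hj
          rw [hroot] at h2
          simp only [pyLt, Bool.or_eq_false_iff, Bool.and_eq_false_iff] at h2
          simp only [decide_eq_false_iff_not, beq_eq_false_iff_ne, ne_eq] at h2
          rcases h2 with ⟨h3, h4⟩
          rcases h4 with h4 | h4 <;> omega
        rw [hji] at hpc
        exact hpc
    have hstepA : stepA (heap, dict, counter) iv =
        (heappush (heappop heap).2 (iv.2, (heappop heap).1.2),
          dict.modify (heappop heap).1.2 [] (· ++ [iv]), counter) := by
      simp only [stepA]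
      rw [if_pos (by simp [hne, hle, List.isEmpty_eq_false_iff])]
    have hstepB : stepB (ends, assigns) iv =
        (ends.set i iv.2, assigns.set i (assigns.getD i [] ++ [iv])) := by
      simp only [stepB, hpick]
      rw [if_pos (by positivity)]
      simp
    obtain ⟨hpop1, hpop2, hpop3⟩ := heappop_spec heap hinv hne
    rw [hstepA, hstepB]
    have hrid : (heappop heap).1.2 = (i : Int) + 1 := by rw [hpop1, hroot]
    obtain ⟨hpushinv, hpushcnt⟩ := heappush_spec (heappop heap).2 (iv.2, (heappop heap).1.2) hpop2
    refine ⟨hpushinv, ?_, ?_, ?_, ?_⟩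
    · -- heap perm
      rw [List.perm_iff_count]
      intro y
      rw [hpushcnt y, modelHeap_set ends i iv.2 hi]
      have e1 := hpop3 y
      have e2 := count_set_add (modelHeap ends) i (iv.2, (i : Int) + 1) y
        (by rw [length_modelHeap]; exact hi)
      rw [hget_modelHeap ends i hi, ← hroot] at e2
      have e3 := hcount y
      rw [hrid]
      by_cases b1 : hget heap 0 = y <;> by_cases b2 : (iv.2, (i : Int) + 1) = y <;>
        simp [b1, b2] at e1 e2 ⊢ <;> omega
    · -- dict
      rw [hrid, hdict]
      have hjlen : i < assigns.length := by omega
      simp only [PySem.Dict.modify, PySem.Dict.getD, PySem.Dict.get?, PySem.Dict.insert,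
        PySem.Dict.contains]
      rw [dmodel_find assigns i hjlen]
      simp only [Option.map_some, Option.getD_some]
      rw [if_pos (dmodel_contains assigns i hjlen)]
      rw [dmodel_set assigns i (assigns.getD i [] ++ [iv]) hjlen]
    · simp; omega
    · simpa using hcnt
  · -- A opens a new court
    have hpick : (pickCourt iv.1 ends).1 = -1 := by
      rcases pickCourt_spec iv.1 ends with ⟨hpc, hnone⟩ | ⟨j, hj, hpc, hq, hmin⟩
      · rw [hpc]
      · exfalso
        have hne : heap ≠ [] := by
          intro hnil
          rw [hnil] at hlenheap
          simp at hlenheap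
          omega
        have hne' : 0 < heap.length := List.length_pos_iff.mpr hne
        have hnle : ¬ (hget heap 0).1 ≤ iv.1 := by
          intro hle
          exact hcond (by simp [hne, hle, List.isEmpty_eq_false_iff])
        have hrootmem : hget heap 0 ∈ modelHeap ends := by
          rw [← hperm.mem_iff, hget_eq_getElem hne']
          exact List.getElem_mem hne'
        obtain ⟨i, hi, hroot⟩ := mem_modelHeap.mp hrootmem
        have h2 : pyLt (ends.getD j 0, (j : Int) + 1) (hget heap 0) = false := by
          apply root_min_mem heap hinv
          rw [hperm.mem_iff]
          exact mem_modelHeap.mpr ⟨j, hj, rfl⟩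
        rw [hroot] at h2 hnle
        simp only [pyLt, Bool.or_eq_false_iff, Bool.and_eq_false_iff,
          decide_eq_false_iff_not, beq_eq_false_iff_ne, ne_eq] at h2
        simp only [] at hnle
        rcases h2 with ⟨h3, h4⟩
        omega
    have hstepA : stepA (heap, dict, counter) iv =
        (heappush heap (iv.2, counter), dict.insert counter [iv], counter + 1) := by
      simp only [stepA]
      rw [if_neg hcond]
    have hstepB : stepB (ends, assigns) iv = (ends ++ [iv.2], assigns ++ [[iv]]) := by
      simp only [stepB]
      rw [if_neg (by rw [hpick]; omega)]
    rw [hstepA, hstepB]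
    obtain ⟨hpushinv, hpushcnt⟩ := heappush_spec heap (iv.2, counter) hinv
    refine ⟨hpushinv, ?_, ?_, ?_, ?_⟩
    · rw [List.perm_iff_count]
      intro y
      rw [hpushcnt y, modelHeap_concat, List.count_append, hcnt]
      have e3 := hcount y
      by_cases b1 : (iv.2, (ends.length : Int) + 1) = y <;> simp [b1] <;> omega
    · rw [hdict, hcnt]
      simp only [PySem.Dict.insert, PySem.Dict.contains]
      rw [← hlen]
      rw [if_neg (by rw [dmodel_not_contains]; simp)]
      rw [dmodel_concat]
    · simp; omega
    · simp [hcnt]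

theorem fold_inv (l : List (Int × Int)) :
    ∀ a b, SimInv a b → SimInv (l.foldl stepA a) (l.foldl stepB b) := by
  induction l with
  | nil => exact fun a b h => h
  | cons x t ih => exact fun a b h => ih _ _ (step_inv a b x h)

theorem init_inv : SimInv ([], PySem.Dict.empty, 1) ([], []) := by
  refine ⟨?_, ?_, ?_, ?_, ?_⟩
  · intro c hc _
    simp at hc
  · simp [modelHeap]
  · rfl
  · rfl
  · simp

theorem dmodel_eq_enumerate (as : List (List (Int × Int))) :
    dmodel as = (PySem.List.enumerate as).map (fun p => (p.1 + 1, p.2)) := by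
  induction as using List.reverseRecOn with
  | nil => rfl
  | append_singleton t L ih =>
    rw [dmodel_concat, PySem.List.enumerate_append, List.map_append, ← ih,
      PySem.List.enumerate_cons, PySem.List.enumerate_nil]
    simp

-- ===== VERDICT (by name: the statement is the Claim_ definition above) =====
theorem assign_courts_spec : Claim_equal_assign_courts := by
  unfold Claim_equal_assign_courts
  intro intervals _
  unfold Spec_assign_courts assign_courts assign_courts_alt
  change (List.foldl stepA ([], PySem.Dict.empty, 1)
      (PySem.List.sorted intervals fun x => x.1)).2.1.items =
    List.map (fun p => (p.1 + 1, p.2)) (PySem.List.enumerate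
      (List.foldl stepB ([], []) (PySem.List.sorted intervals fun x => x.1)).2)
  have h := fold_inv (PySem.List.sorted intervals (fun x => x.1)) _ _ init_inv
  obtain ⟨_, _, hdict, _, _⟩ := h
  rw [hdict, PySem.Dict.items, dmodel_eq_enumerate]
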